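-- pv_equiv track=rewrite | github.com/reiman2222/school-assigments | CNA/paper.py | cleanAffiliation
-- ===== SOURCE A (Python) =====
-- def cleanAffiliation(affiliation):
-- 	cleanAfflLower = affiliation.lower().split(',')
-- 	cleanAffl = affiliation.split(',')
--
-- 	matched = False
--
-- 	i = 0
-- 	while(i < len(cleanAfflLower)):
-- 		if(cleanAfflLower[i] == ''):
-- 			i = i #do nothing
-- 		elif('university.' in cleanAfflLower[i]):
-- 			clean = cleanAffl[i].strip()
-- 			clean = clean.replace('University.', 'University')
-- 			return clean
-- 		elif('university' in cleanAfflLower[i]):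
-- 			return cleanAffl[i].strip()
-- 		elif('unv.' in cleanAfflLower[i]):
-- 			clean = cleanAffl[i].strip()
-- 			clean = clean.replace('Unv.', 'University')
-- 			return clean
-- 		elif('univ.' in cleanAfflLower[i]):
-- 			clean = cleanAffl[i].strip()
-- 			clean = clean.replace('Univ.', 'University')
-- 			return clean
-- 		elif('univ' in cleanAfflLower[i]):
-- 			clean = cleanAffl[i].strip()
-- 			clean = clean.replace('Univ', 'University')
-- 			return clean
--
-- 		elif('institute' in cleanAfflLower[i]):
-- 			return cleanAffl[i].strip()
-- 		i = i + 1
--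
-- 	i = 0
-- 	while(i < len(cleanAfflLower)):
-- 		if(cleanAfflLower[i] == ''):
-- 			i = i #do nothing
-- 		elif('college' in cleanAfflLower[i]):
-- 			return cleanAffl[i].strip()
-- 		i = i + 1
--
-- 	return affiliation #affiliation could not be simplified
-- ===== SOURCE B (Python) =====
-- # Table-driven single pass: a keyword/replacement table replaces A's hard-coded
-- # if-chain, and A's two scans are fused into one loop with a college candidate.
-- PATTERNS = [
-- 	('university.', 'University.'),
-- 	('university', None),
-- 	('unv.', 'Unv.'),
-- 	('univ.', 'Univ.'),
-- 	('univ', 'Univ'),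
-- 	('institute', None),
-- ]
--
-- def cleanAffiliation(affiliation):
-- 	college = None
-- 	for low, orig in zip(affiliation.lower().split(','), affiliation.split(',')):
-- 		if low == '':
-- 			continue
-- 		for kw, old in PATTERNS:
-- 			if kw in low:
-- 				s = orig.strip()
-- 				return s if old is None else s.replace(old, 'University')
-- 		if college is None and 'college' in low:
-- 			college = orig.strip()
-- 	return affiliation if college is None else college
-- ===== Notes on version B (the rewrite author's own statement) =====
-- stated objective: alternative
-- what changed: A's hard-coded six-branch if-chain is replaced by a data-driven search over a keyword/replacement table, and A's two separate while-loops over the comma-split segments are fused into one pass that keeps the first 'college' segment as a fallback candidate.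
import Mathlib
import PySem

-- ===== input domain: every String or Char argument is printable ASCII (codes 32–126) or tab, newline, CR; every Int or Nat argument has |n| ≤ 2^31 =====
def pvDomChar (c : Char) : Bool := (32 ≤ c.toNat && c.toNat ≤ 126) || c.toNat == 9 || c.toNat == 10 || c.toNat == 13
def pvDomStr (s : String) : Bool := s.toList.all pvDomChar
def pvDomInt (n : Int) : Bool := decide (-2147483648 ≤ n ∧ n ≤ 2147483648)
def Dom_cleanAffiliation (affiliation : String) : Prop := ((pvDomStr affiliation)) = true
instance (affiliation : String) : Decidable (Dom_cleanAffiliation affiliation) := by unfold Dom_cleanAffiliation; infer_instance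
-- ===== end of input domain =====

-- B replaces A's hard-coded if-chain by a keyword/replacement table searched
-- generically, and fuses A's two scans into one pass with a college candidate
-- (objective: alternative, same cost).

-- ===== PORT A =====
-- A's first while loop, walking the lowercase and original segment lists in
-- step (equal length by construction); 'some r' models the early return.
def aLoop1 : List String → List String → Option String
  | lw :: tlw, lo :: tlo =>
    if lw = "" then aLoop1 tlw tlo
    else if PySem.Str.isIn "university." lw then
      some (PySem.Str.replace (PySem.Str.strip lo) "University." "University")
    else if PySem.Str.isIn "university" lw then some (PySem.Str.strip lo)
    else if PySem.Str.isIn "unv." lw then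
      some (PySem.Str.replace (PySem.Str.strip lo) "Unv." "University")
    else if PySem.Str.isIn "univ." lw then
      some (PySem.Str.replace (PySem.Str.strip lo) "Univ." "University")
    else if PySem.Str.isIn "univ" lw then
      some (PySem.Str.replace (PySem.Str.strip lo) "Univ" "University")
    else if PySem.Str.isIn "institute" lw then some (PySem.Str.strip lo)
    else aLoop1 tlw tlo
  | _, _ => none

-- A's second while loop (college scan).
def aLoop2 : List String → List String → Option String
  | lw :: tlw, lo :: tlo =>
    if lw = "" then aLoop2 tlw tlo
    else if PySem.Str.isIn "college" lw then some (PySem.Str.strip lo)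
    else aLoop2 tlw tlo
  | _, _ => none

def cleanAffiliation (affiliation : String) : String :=
  let cleanAfflLower := (PySem.Str.split? (PySem.Str.lower affiliation) ",").getD []
  let cleanAffl := (PySem.Str.split? affiliation ",").getD []
  match aLoop1 cleanAfflLower cleanAffl with
  | some r => r
  | none =>
    match aLoop2 cleanAfflLower cleanAffl with
    | some r => r
    | none => affiliation

-- ===== PORT B =====
-- B's PATTERNS table: keyword to search, and the text to replace by
-- "University" (none = return the stripped segment unchanged).
def bPatterns : List (String × Option String) :=
  [("university.", some "University."), ("university", none),
   ("unv.", some "Unv."), ("univ.", some "Univ."), ("univ", some "Univ"),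
   ("institute", none)]

-- B's inner for-loop over the table: first matching pattern, applied.
def bMatch (low orig : String) : Option String :=
  (bPatterns.find? (fun p => PySem.Str.isIn p.1 low)).map (fun p =>
    match p.2 with
    | none => PySem.Str.strip orig
    | some old => PySem.Str.replace (PySem.Str.strip orig) old "University")

-- B's single outer loop; 'c' is the stored college candidate.
def bLoop : List String → List String → Option String → Option String
  | lw :: tlw, lo :: tlo, c =>
    if lw = "" then bLoop tlw tlo c
    else
      match bMatch lw lo with
      | some r => some r
      | none =>
        bLoop tlw tlo
          (if c.isNone && PySem.Str.isIn "college" lw then some (PySem.Str.strip lo) else c)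
  | _, _, c => c

def cleanAffiliation_alt (affiliation : String) : String :=
  (bLoop ((PySem.Str.split? (PySem.Str.lower affiliation) ",").getD [])
    ((PySem.Str.split? affiliation ",").getD []) none).getD affiliation

-- ===== PRECONDITION & SPEC =====
def Spec_cleanAffiliation (affiliation : String) (out : String) : Prop := out = cleanAffiliation_alt affiliation
instance (affiliation : String) (out : String) : Decidable (Spec_cleanAffiliation affiliation out) := by unfold Spec_cleanAffiliation; infer_instance

-- ===== CLAIM (what is proved, stated in full; the proofs are below) =====
def Claim_equal_cleanAffiliation : Prop := ∀ (affiliation : String), Dom_cleanAffiliation affiliation → Spec_cleanAffiliation affiliation (cleanAffiliation affiliation)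

-- ===== LEMMAS AND PROOFS =====

-- The table search equals A's if-chain on one segment.
theorem bMatch_eq (lw lo : String) :
    bMatch lw lo =
      (if PySem.Str.isIn "university." lw then
        some (PySem.Str.replace (PySem.Str.strip lo) "University." "University")
      else if PySem.Str.isIn "university" lw then some (PySem.Str.strip lo)
      else if PySem.Str.isIn "unv." lw then
        some (PySem.Str.replace (PySem.Str.strip lo) "Unv." "University")
      else if PySem.Str.isIn "univ." lw then
        some (PySem.Str.replace (PySem.Str.strip lo) "Univ." "University")
      else if PySem.Str.isIn "univ" lw then
        some (PySem.Str.replace (PySem.Str.strip lo) "Univ" "University")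
      else if PySem.Str.isIn "institute" lw then some (PySem.Str.strip lo)
      else none) := by
  simp only [bMatch, bPatterns, List.find?]
  split_ifs <;> simp_all

-- Fusion invariant: B's single loop equals A's first loop, else the stored
-- candidate, else A's second loop.
theorem bLoop_eq (lw lo : List String) (c : Option String) :
    bLoop lw lo c = ((aLoop1 lw lo).or (c.or (aLoop2 lw lo))) := by
  induction lw generalizing lo c with
  | nil => cases lo <;> simp [bLoop, aLoop1, aLoop2]
  | cons h t ih =>
    cases lo with
    | nil => simp [bLoop, aLoop1, aLoop2]
    | cons h' t' =>
      rw [bLoop, aLoop1, aLoop2, bMatch_eq]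
      split_ifs
      all_goals try rfl
      all_goals rw [ih]
      all_goals cases c
      all_goals simp_all

-- ===== VERDICT (by name: the statement is the Claim_ definition above) =====
theorem cleanAffiliation_spec : Claim_equal_cleanAffiliation := by
  intro affiliation _
  unfold Spec_cleanAffiliation cleanAffiliation cleanAffiliation_alt
  rw [bLoop_eq]
  rcases h1 : aLoop1 ((PySem.Str.split? (PySem.Str.lower affiliation) ",").getD [])
      ((PySem.Str.split? affiliation ",").getD []) with _ | r <;>
    rcases h2 : aLoop2 ((PySem.Str.split? (PySem.Str.lower affiliation) ",").getD [])
        ((PySem.Str.split? affiliation ",").getD []) with _ | r2 <;>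
      simp [h1, h2]
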